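-- pv_equiv track=rewrite | github.com/AgrawallaBhavya/Harrison_Cohomology | gauss_reduction.py | create_shuffles
-- ===== SOURCE A (Python) =====
-- def create_shuffles(elements, i , j):
-- #given a permutation, create a list of it's i+j shuffles
--     shuffles = set()
--     if j == 0:
--         shuffles.add(elements)
--     elif j==1:
--         last_element = elements[-1]
--         temp_list = list(elements[:-1])
--         for s in range(i+j-1):
--             temp_list.insert(s, last_element)
--             shuffles.add(tuple(temp_list))
--             temp_list.pop(s)
--         temp_list.append(last_element)
--         shuffles.add(tuple(temp_list))
--     else:
--         last_element = elements[-1]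
--         second_last_element = elements[-2]
--         temp_list = list(elements)
--         temp_list.pop(-1)
--         temp_elements = tuple(temp_list)
--         temp_shuffles = create_shuffles(temp_elements, i, j-1)
--         for shuffle in temp_shuffles:
--             temp_list = list(shuffle)
--             begin_at = shuffle.index(second_last_element)
--             for s in range(begin_at + 1, i+j-1):
--                 temp_list.insert(s, last_element)
--                 shuffles.add(tuple(temp_list))
--                 temp_list.pop(s)
--             temp_list.append(last_element)
--             shuffles.add(tuple(temp_list))
--     return shuffles
-- ===== SOURCE B (Python) =====
-- def create_shuffles(elements, i, j):
--     # iterative bottom-up over j instead of recursion; builds each shuffle by tuple slicing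
--     if j == 0:
--         return {elements}
--     n = len(elements)
--     base = elements[:n - j]
--     x = elements[n - j]
--     cur = {base[:s] + (x,) + base[s:] for s in range(i)} | {base + (x,)}
--     for k in range(2, j + 1):
--         x = elements[n - j + k - 1]
--         prev = elements[n - j + k - 2]
--         nxt = set()
--         for sh in cur:
--             b = sh.index(prev)
--             for s in range(b + 1, i + k - 1):
--                 nxt.add(sh[:s] + (x,) + sh[s:])
--             nxt.add(sh + (x,))
--         cur = nxt
--     return cur
-- ===== Notes on version B (the rewrite author's own statement) =====
-- stated objective: alternative
-- what changed: Replaces A's recursion on j (peeling the last element and recursing) by a single bottom-up loop that builds the j==1 level for the length-(n-j+1) prefix and then inserts each remaining trailing element in turn, constructing each shuffle by tuple slicing instead of insert/add/pop mutation on a temp list.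
import Mathlib
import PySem

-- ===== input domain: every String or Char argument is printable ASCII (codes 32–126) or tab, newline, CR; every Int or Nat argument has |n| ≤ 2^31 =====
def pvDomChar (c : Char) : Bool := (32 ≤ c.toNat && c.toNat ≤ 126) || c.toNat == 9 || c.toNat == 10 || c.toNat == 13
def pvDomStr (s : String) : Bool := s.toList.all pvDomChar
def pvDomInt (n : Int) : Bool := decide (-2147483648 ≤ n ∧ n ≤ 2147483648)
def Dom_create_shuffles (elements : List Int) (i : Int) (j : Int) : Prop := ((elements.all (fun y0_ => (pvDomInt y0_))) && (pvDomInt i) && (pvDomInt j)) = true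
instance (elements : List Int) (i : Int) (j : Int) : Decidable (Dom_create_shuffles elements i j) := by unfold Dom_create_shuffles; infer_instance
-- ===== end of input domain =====

-- B replaces A's recursion on j by a single bottom-up loop over the trailing elements,
-- building each shuffle by tuple slicing instead of insert/pop mutation (objective: alternative decomposition).


-- ===== PORT A =====
-- literal port of A; the insert/add/pop(s) pattern adds insert(temp, s, last) and restores temp
-- (pop(s) raises IndexError when s exceeds the list length — those inputs are excluded by Pre_).
def create_shuffles (elements : List Int) (i : Int) (j : Int) : List (List Int) :=
  if j = 0 then
    PySem.Set.add PySem.Set.empty elements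
  else if j = 1 then
    match PySem.List.pyGet? elements (-1) with
    | none => []  -- IndexError, outside Pre_
    | some last =>
      let temp := PySem.List.slice elements none (some (-1))
      let shuffles := (PySem.List.pyRange 0 (i + 1 - 1) 1).foldl
        (fun acc s => PySem.Set.add acc (PySem.List.insert temp s last)) PySem.Set.empty
      PySem.Set.add shuffles (temp ++ [last])
  else if _hneg : j < 0 then []  -- Python recurses without end here; totality guard, outside Pre_
  else
    match PySem.List.pyGet? elements (-1), PySem.List.pyGet? elements (-2) with
    | some last, some second_last =>
      let temp_elements := PySem.List.slice elements none (some (-1))  -- list(elements); pop(-1)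
      let temp_shuffles := create_shuffles temp_elements i (j - 1)
      temp_shuffles.foldl (fun shuffles shuffle =>
        match PySem.List.index? shuffle second_last with
        | none => shuffles  -- ValueError, unreachable under Pre_
        | some b =>
          let shuffles := (PySem.List.pyRange ((b : Int) + 1) (i + j - 1) 1).foldl
            (fun acc s => PySem.Set.add acc (PySem.List.insert shuffle s last)) shuffles
          PySem.Set.add shuffles (shuffle ++ [last])) PySem.Set.empty
    | _, _ => []  -- IndexError, outside Pre_
  termination_by j.toNat
  decreasing_by omega

-- ===== PORT B =====
-- sh[:s] + (x,) + sh[s:]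
def insAt (sh : List Int) (s : Int) (x : Int) : List Int :=
  PySem.List.slice sh none (some s) ++ [x] ++ PySem.List.slice sh (some s) none

def create_shuffles_alt (elements : List Int) (i : Int) (j : Int) : List (List Int) :=
  if j = 0 then PySem.Set.ofList [elements]
  else
    let n : Int := PySem.List.len elements
    -- elements[n-j] raises IndexError outside Pre_ (the .elim default is never reached inside it)
    (PySem.List.pyGet? elements (n - j)).elim [] (fun x =>
      let base := PySem.List.slice elements none (some (n - j))
      let cur := PySem.Set.union
        ((PySem.List.pyRange 0 i 1).foldl (fun acc s => PySem.Set.add acc (insAt base s x)) PySem.Set.empty)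
        [base ++ [x]]
      (PySem.List.pyRange 2 (j + 1) 1).foldl (fun cur k =>
        (PySem.List.pyGet? elements (n - j + k - 1)).elim cur (fun x =>
          (PySem.List.pyGet? elements (n - j + k - 2)).elim cur (fun prev =>
            cur.foldl (fun nxt sh =>
              (PySem.List.index? sh prev).elim nxt (fun b =>
                let nxt := (PySem.List.pyRange ((b : Int) + 1) (i + k - 1) 1).foldl
                  (fun acc s => PySem.Set.add acc (insAt sh s x)) nxt
                PySem.Set.add nxt (sh ++ [x]))) PySem.Set.empty))) cur)

-- ===== PRECONDITION & SPEC =====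
-- Exactly where the Python A returns: j=0 always; for j ≥ 1 it needs len(elements) ≥ j (else
-- elements[-1]/[-2] raise IndexError) and i ≤ len - j + 1 (else temp_list.pop(s) raises IndexError);
-- j < 0 recurses forever (RecursionError).
def Pre_create_shuffles (elements : List Int) (i : Int) (j : Int) : Prop :=
  j = 0 ∨ (1 ≤ j ∧ j ≤ PySem.List.len elements ∧ i ≤ PySem.List.len elements - j + 1)
instance (elements : List Int) (i : Int) (j : Int) : Decidable (Pre_create_shuffles elements i j) := by unfold Pre_create_shuffles; infer_instance

def pvWitness_create_shuffles : List Int × Int × Int := ([1, 2, 3], 1, 2)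

def Spec_create_shuffles (elements : List Int) (i : Int) (j : Int) (out : List (List Int)) : Prop := out = create_shuffles_alt elements i j
instance (elements : List Int) (i : Int) (j : Int) (out : List (List Int)) : Decidable (Spec_create_shuffles elements i j out) := by unfold Spec_create_shuffles; infer_instance

-- ===== CLAIM (what is proved, stated in full; the proofs are below) =====
def Claim_equal_create_shuffles : Prop := ∀ (elements : List Int) (i : Int) (j : Int), Dom_create_shuffles elements i j → Pre_create_shuffles elements i j → Spec_create_shuffles elements i j (create_shuffles elements i j)

-- ===== LEMMAS AND PROOFS =====

-- helper: insAt as take/drop (proof-only)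
theorem insAt_take_drop (l : List Int) (s x : Int) (hs : 0 ≤ s) :
    insAt l s x = l.take s.toNat ++ x :: l.drop s.toNat := by
  unfold insAt
  rw [PySem.List.slice_to _ hs, PySem.List.slice_from _ hs]
  simp

-- Python's list.insert(s, x) equals the slice splice sh[:s] + (x,) + sh[s:] for s ≥ 0
theorem insert_eq_insAt (l : List Int) (s x : Int) (hs : 0 ≤ s) :
    PySem.List.insert l s x = insAt l s x := by
  rw [insAt_take_drop l s x hs]
  simp only [PySem.List.insert, PySem.List.sliceIndices, if_neg (not_lt.mpr hs)]
  norm_num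
  have h1 : List.take (min s (l.length:Int)).toNat l = List.take s.toNat l := by
    rcases le_or_gt s (l.length:Int) with h|h
    · rw [min_eq_left h]
    · rw [min_eq_right h.le]
      rw [Int.toNat_natCast, List.take_length, List.take_of_length_le (by omega)]
  have h2 : List.drop (min s (l.length:Int)).toNat l = List.drop s.toNat l := by
    rcases le_or_gt s (l.length:Int) with h|h
    · rw [min_eq_left h]
    · rw [min_eq_right h.le]
      rw [Int.toNat_natCast, List.drop_length, List.drop_eq_nil_of_le (by omega)]
  rw [h1, h2]

-- the common level step: insert `la` into every shuffle after the position of `prev` (proof-only)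
def shStep (la prev bound : Int) (t : List (List Int)) : List (List Int) :=
  t.foldl (fun nxt sh =>
    (PySem.List.index? sh prev).elim nxt (fun b =>
      PySem.Set.add
        ((PySem.List.pyRange ((b : Int) + 1) bound 1).foldl
          (fun acc s => PySem.Set.add acc (insAt sh s la)) nxt)
        (sh ++ [la]))) PySem.Set.empty

theorem pyGet?_concat_lt (ys : List Int) (la : Int) (idx : Int) (h0 : 0 ≤ idx)
    (h1 : idx < (ys.length : Int)) :
    PySem.List.pyGet? (ys ++ [la]) idx = PySem.List.pyGet? ys idx := by
  rw [PySem.List.pyGet?_of_nonneg _ h0, PySem.List.pyGet?_of_nonneg _ h0,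
    List.getElem?_append_left (by omega)]

theorem pyGet?_concat_last (ys : List Int) (la : Int) (idx : Int)
    (h : idx = (ys.length : Int)) :
    PySem.List.pyGet? (ys ++ [la]) idx = some la := by
  subst h
  exact PySem.List.pyGet?_append_length ys [] la

theorem slice_concat_le (ys : List Int) (la : Int) (c : Int) (h0 : 0 ≤ c)
    (h1 : c ≤ (ys.length : Int)) :
    PySem.List.slice (ys ++ [la]) none (some c) = PySem.List.slice ys none (some c) := by
  rw [PySem.List.slice_to _ h0, PySem.List.slice_to _ h0,
    List.take_append_of_le_length (by omega)]

-- A's else-branch fold (with insert/pop) is shStep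
theorem A_fold_eq_shStep (la prev bound : Int) (t : List (List Int)) :
    t.foldl (fun shuffles shuffle =>
      match PySem.List.index? shuffle prev with
      | none => shuffles
      | some b =>
        let shuffles := (PySem.List.pyRange ((b : Int) + 1) bound 1).foldl
          (fun acc s => PySem.Set.add acc (PySem.List.insert shuffle s la)) shuffles
        PySem.Set.add shuffles (shuffle ++ [la])) PySem.Set.empty
    = shStep la prev bound t := by
  unfold shStep
  congr 1
  funext nxt sh
  cases h : PySem.List.index? sh prev with
  | none => rfl
  | some b =>
    simp only [Option.elim_some]
    congr 1
    refine PySem.List.foldl_congr_mem _ _ _ _ ?_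
    intro acc s hs
    rw [insert_eq_insAt sh s la (by
      have := (PySem.List.mem_pyRange_one).mp hs
      omega)]

theorem pyGet?_len_sub_one (ys : List Int) (hys : ys ≠ []) :
    PySem.List.pyGet? ys ((ys.length : Int) - 1) = some (ys.getLast hys) := by
  have hN : 0 < ys.length := List.length_pos_iff.mpr hys
  rw [PySem.List.pyGet?_of_nonneg _ (by omega)]
  rw [List.getElem?_eq_getElem (by omega)]
  have ht : ((ys.length : Int) - 1).toNat = ys.length - 1 := by omega
  simp [List.getLast_eq_getElem, ht]

-- peeling the last level off B's bottom-up loop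
theorem B_step (ys : List Int) (la : Int) (i j : Int) (hys : ys ≠ [])
    (h2 : 2 ≤ j) (hjn : j ≤ (ys.length : Int) + 1) :
    create_shuffles_alt (ys ++ [la]) i j
      = shStep la (ys.getLast hys) (i + j - 1) (create_shuffles_alt ys i (j - 1)) := by
  have hN : 0 < ys.length := List.length_pos_iff.mpr hys
  unfold create_shuffles_alt
  rw [if_neg (by omega : ¬ j = 0), if_neg (by omega : ¬ j - 1 = 0)]
  simp only [PySem.List.len_eq, List.length_append, List.length_cons, List.length_nil]
  push_cast
  have e1 : (ys.length : Int) - (j - 1) = (ys.length : Int) + 1 - j := by ring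
  have e2 : j - 1 + 1 = j := by ring
  simp only [e1, e2]
  have hc0 : (0:Int) ≤ (ys.length : Int) + 1 - j := by omega
  have hcN : (ys.length : Int) + 1 - j < (ys.length : Int) := by omega
  rw [pyGet?_concat_lt ys la _ hc0 hcN]
  cases hx : PySem.List.pyGet? ys ((ys.length : Int) + 1 - j) with
  | none => rfl
  | some x =>
    simp only [Option.elim_some]
    simp only [slice_concat_le ys la _ hc0 (le_of_lt hcN)]
    rw [PySem.List.pyRange_one_succ_right (show (2:Int) ≤ j by omega)]
    rw [List.foldl_append]
    simp only [List.foldl_cons, List.foldl_nil]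
    have ej1 : (ys.length:Int) + 1 - j + j - 1 = (ys.length:Int) := by ring
    have ej2 : (ys.length:Int) + 1 - j + j - 2 = (ys.length:Int) - 1 := by ring
    rw [ej1, ej2, pyGet?_concat_last ys la _ rfl,
      pyGet?_concat_lt ys la _ (by omega) (by omega), pyGet?_len_sub_one ys hys]
    simp only [Option.elim_some]
    unfold shStep
    refine congrArg _ ?_
    refine PySem.List.foldl_congr_mem _ _ _ _ ?_
    intro acc k hk
    obtain ⟨hk2, hkj⟩ := PySem.List.mem_pyRange_one.mp hk
    rw [pyGet?_concat_lt ys la ((ys.length:Int) + 1 - j + k - 1) (by omega) (by omega),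
      pyGet?_concat_lt ys la ((ys.length:Int) + 1 - j + k - 2) (by omega) (by omega)]

theorem pyGet?_neg_two_concat (ys : List Int) (la : Int) (hys : ys ≠ []) :
    PySem.List.pyGet? (ys ++ [la]) (-2) = some (ys.getLast hys) := by
  have hN : 0 < ys.length := List.length_pos_iff.mpr hys
  rw [PySem.List.pyGet?_neg_ofNat (ys ++ [la]) 2 (by omega)
    (by simp only [List.length_append, List.length_cons, List.length_nil]; omega)]
  have ht : (ys ++ [la]).length - 2 = ys.length - 1 := by
    simp only [List.length_append, List.length_cons, List.length_nil]; omega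
  rw [ht, List.getElem?_append_left (by omega), List.getElem?_eq_getElem (by omega)]
  rw [List.getLast_eq_getElem]

-- the j == 1 base case
theorem base1 (el : List Int) (i : Int) (hlen : 1 ≤ (el.length : Int)) :
    create_shuffles el i 1 = create_shuffles_alt el i 1 := by
  obtain ⟨ys, la, hel⟩ := el.eq_nil_or_concat.resolve_left (by
    intro h; subst h; simp at hlen)
  rw [List.concat_eq_append] at hel
  subst hel
  unfold create_shuffles create_shuffles_alt
  rw [if_neg (by norm_num : ¬ (1:Int) = 0), if_pos rfl, if_neg (by norm_num : ¬ (1:Int) = 0)]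
  rw [PySem.List.pyGet?_neg_one_append_singleton]
  simp only [PySem.List.len_eq, List.length_append, List.length_cons, List.length_nil]
  push_cast
  have e0 : ((ys.length : Int) + 1) - 1 = (ys.length : Int) := by ring
  rw [e0, pyGet?_concat_last ys la _ rfl]
  simp only [Option.elim_some]
  rw [PySem.List.pyRange_one_eq_nil (by norm_num : (2:Int) ≤ 2), List.foldl_nil]
  rw [PySem.List.slice_to_neg_one, List.dropLast_concat]
  rw [PySem.List.slice_to _ (by omega : (0:Int) ≤ (ys.length : Int))]
  have ht : ((ys.length : Int)).toNat = ys.length := by omega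
  rw [ht, List.take_left]
  rw [show i + 1 - 1 = i from by ring]
  show PySem.Set.add _ (ys ++ [la]) = PySem.Set.add _ (ys ++ [la])
  refine congrArg (fun t => PySem.Set.add t (ys ++ [la])) ?_
  refine PySem.List.foldl_congr_mem _ _ _ _ ?_
  intro acc s hs
  obtain ⟨hs0, _⟩ := PySem.List.mem_pyRange_one.mp hs
  rw [insert_eq_insAt ys s la hs0]

-- the j ≥ 2 step: A's recursive call becomes one more level of B's loop
theorem stepj (el : List Int) (i j : Int) (h2 : 2 ≤ j) (hjn : j ≤ (el.length : Int))
    (hi : i ≤ (el.length : Int) - j + 1)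
    (ih : ∀ el' : List Int, Pre_create_shuffles el' i (j - 1) →
      create_shuffles el' i (j - 1) = create_shuffles_alt el' i (j - 1)) :
    create_shuffles el i j = create_shuffles_alt el i j := by
  obtain ⟨ys, la, hel⟩ := el.eq_nil_or_concat.resolve_left (by
    intro h; subst h; simp at hjn; omega)
  rw [List.concat_eq_append] at hel
  subst hel
  have hys : ys ≠ [] := by
    intro h; subst h; simp at hjn; omega
  have hN : 0 < ys.length := List.length_pos_iff.mpr hys
  unfold create_shuffles
  rw [if_neg (by omega : ¬ j = 0), if_neg (by omega : ¬ j = 1)]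
  rw [dif_neg (by omega : ¬ j < 0)]
  rw [PySem.List.pyGet?_neg_one_append_singleton, pyGet?_neg_two_concat ys la hys]
  dsimp only
  rw [PySem.List.slice_to_neg_one, List.dropLast_concat]
  rw [A_fold_eq_shStep]
  rw [ih ys (by
    unfold Pre_create_shuffles
    simp only [PySem.List.len_eq] at hjn ⊢
    right
    simp only [List.length_append, List.length_cons, List.length_nil] at hjn
    simp only [List.length_append, List.length_cons, List.length_nil] at hi
    refine ⟨by omega, by omega, by omega⟩)]
  exact (B_step ys la i j hys h2 (by
    simp only [List.length_append, List.length_cons, List.length_nil] at hjn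
    omega)).symm

-- main induction on j
theorem A_eq_B (m : Nat) : ∀ (elements : List Int) (i : Int),
    Pre_create_shuffles elements i (m : Int) →
    create_shuffles elements i (m : Int) = create_shuffles_alt elements i (m : Int) := by
  induction m with
  | zero =>
    intro el i _
    simp only [Nat.cast_zero]
    unfold create_shuffles create_shuffles_alt
    rw [if_pos rfl, if_pos rfl]
    rfl
  | succ m ih =>
    intro el i hpre
    have hj : (((m + 1 : Nat)) : Int) = (m : Int) + 1 := by push_cast; ring
    rw [hj] at hpre ⊢
    simp only [Pre_create_shuffles, PySem.List.len_eq] at hpre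
    by_cases hm : m = 0
    · subst hm
      simp only [Nat.cast_zero, zero_add] at hpre ⊢
      exact base1 el i (by omega)
    · refine stepj el i ((m : Int) + 1) (by omega) (by omega) (by omega) ?_
      intro el' hpre'
      have hj1 : ((m : Int) + 1 - 1) = (m : Int) := by ring
      rw [hj1] at hpre' ⊢
      exact ih el' i hpre'

-- ===== VERDICT (by name: the statement is the Claim_ definition above) =====
theorem create_shuffles_spec : Claim_equal_create_shuffles := by
  intro elements i j _hdom hpre
  unfold Spec_create_shuffles
  have hj0 : 0 ≤ j := by rcases hpre with h | ⟨h, _⟩ <;> omega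
  have hj : j = ((j.toNat : Nat) : Int) := by omega
  rw [hj] at hpre ⊢
  exact A_eq_B j.toNat elements i hpre
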